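-- pv_equiv track=rewrite | github.com/pimmie001/Structy | graph/island_count.py | make_edges
-- ===== SOURCE A (Python) =====
-- def make_edges(grid):
--     edges = {}
--     n = len(grid)
--     m = len(grid[0])
--
--     for y in range(n):
--         for x in range(m):
--             item = grid[y][x]
--             if item == 'W':
--                 continue
--
--             adjacent = []
--
--             if y > 0:
--                 if grid[y-1][x] == 'L':
--                     adjacent.append((x,y-1))
--             if y < n-1:
--                 if grid[y+1][x] == 'L':
--                     adjacent.append((x,y+1))
--             if x > 0:
--                 if grid[y][x-1] == 'L':
--                     adjacent.append((x-1,y))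
--             if x < m-1:
--                 if grid[y][x+1] == 'L':
--                     adjacent.append((x+1,y))
--
--             edges[(x,y)] = adjacent
--
--     return edges
-- ===== SOURCE B (Python) =====
-- def make_edges(grid):
--     n = len(grid)
--     m = len(grid[0])
--     # Scatter pass: each land cell registers itself in four direction maps,
--     # keyed by the neighbouring cell it serves as up/down/left/right neighbour of.
--     up, down, left, right = {}, {}, {}, {}
--     for y in range(n):
--         for x in range(m):
--             if grid[y][x] == 'L':
--                 up[(x, y + 1)] = (x, y)
--                 down[(x, y - 1)] = (x, y)
--                 left[(x + 1, y)] = (x, y)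
--                 right[(x - 1, y)] = (x, y)
--     # Gather pass: a non-water cell's adjacency list is just its entry in each map.
--     edges = {}
--     for y in range(n):
--         for x in range(m):
--             if grid[y][x] != 'W':
--                 k = (x, y)
--                 edges[k] = [d[k] for d in (up, down, left, right) if k in d]
--     return edges
-- ===== Notes on version B (the rewrite author's own statement) =====
-- stated objective: alternative
-- what changed: B inverts the data flow: instead of each cell testing its four neighbours with boundary checks, a scatter pass has every land cell register itself in four direction maps keyed by the neighbour it serves, and a gather pass assembles each non-water cell's list by looking up its own key in the four maps.
import Mathlib
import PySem

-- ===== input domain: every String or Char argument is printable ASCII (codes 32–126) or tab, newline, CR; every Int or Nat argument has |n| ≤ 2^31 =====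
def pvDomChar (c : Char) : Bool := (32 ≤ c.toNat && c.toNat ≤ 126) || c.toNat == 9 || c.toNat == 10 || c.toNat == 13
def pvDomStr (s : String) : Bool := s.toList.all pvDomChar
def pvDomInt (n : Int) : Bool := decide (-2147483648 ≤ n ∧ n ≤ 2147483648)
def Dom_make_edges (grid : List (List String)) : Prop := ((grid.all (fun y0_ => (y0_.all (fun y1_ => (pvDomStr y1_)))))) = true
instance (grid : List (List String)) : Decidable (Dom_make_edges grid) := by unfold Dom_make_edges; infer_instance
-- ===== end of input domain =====

-- B inverts the data flow: a scatter pass has each land cell register itself in four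
-- direction maps keyed by the neighbour it serves; a gather pass then assembles each
-- non-water cell's list by looking up its own key (objective: alternative; no speed claim).

-- grid[y][x]; the "" default is only reached outside Pre_make_edges (where Python raises)
def pvCell (grid : List (List String)) (y x : Int) : String :=
  (PySem.List.pyGet? ((PySem.List.pyGet? grid y).getD []) x).getD ""

-- ===== PORT A =====
-- dict keys (x,y) are pairwise distinct over the iteration, so dict insertion is a plain append of the triple
def make_edges (grid : List (List String)) : List (Int × Int × List (Int × Int)) :=
  let n : Int := grid.length
  let m : Int := ((PySem.List.pyGet? grid 0).getD []).length
  (PySem.List.pyRange 0 n 1).foldl (fun edges y =>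
    (PySem.List.pyRange 0 m 1).foldl (fun edges x =>
      let item := pvCell grid y x
      if item == "W" then edges
      else
        let adjacent : List (Int × Int) := []
        let adjacent := if y > 0 then
            (if pvCell grid (y-1) x == "L" then adjacent ++ [(x, y-1)] else adjacent) else adjacent
        let adjacent := if y < n-1 then
            (if pvCell grid (y+1) x == "L" then adjacent ++ [(x, y+1)] else adjacent) else adjacent
        let adjacent := if x > 0 then
            (if pvCell grid y (x-1) == "L" then adjacent ++ [(x-1, y)] else adjacent) else adjacent
        let adjacent := if x < m-1 then
            (if pvCell grid y (x+1) == "L" then adjacent ++ [(x+1, y)] else adjacent) else adjacent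
        edges ++ [(x, y, adjacent)]) edges) []

-- ===== PORT B =====
-- dict keys (x,y) of 'edges' are pairwise distinct over the iteration, so dict insertion
-- is a plain append of the triple; the four direction dicts are one 4-tuple fold state
def make_edges_alt (grid : List (List String)) : List (Int × Int × List (Int × Int)) :=
  let n : Int := grid.length
  let m : Int := ((PySem.List.pyGet? grid 0).getD []).length
  let dicts :
      PySem.Dict (Int × Int) (Int × Int) × PySem.Dict (Int × Int) (Int × Int) ×
      PySem.Dict (Int × Int) (Int × Int) × PySem.Dict (Int × Int) (Int × Int) :=
    (PySem.List.pyRange 0 n 1).foldl (fun ds y =>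
      (PySem.List.pyRange 0 m 1).foldl (fun ds x =>
        if pvCell grid y x == "L" then
          (ds.1.insert (x, y + 1) (x, y),
           ds.2.1.insert (x, y - 1) (x, y),
           ds.2.2.1.insert (x + 1, y) (x, y),
           ds.2.2.2.insert (x - 1, y) (x, y))
        else ds) ds)
      (PySem.Dict.empty, PySem.Dict.empty, PySem.Dict.empty, PySem.Dict.empty)
  (PySem.List.pyRange 0 n 1).foldl (fun edges y =>
    (PySem.List.pyRange 0 m 1).foldl (fun edges x =>
      if pvCell grid y x != "W" then
        edges ++ [(x, y, [dicts.1, dicts.2.1, dicts.2.2.1, dicts.2.2.2].filterMap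
          (fun d => d.get? (x, y)))]
      else edges) edges) []

-- ===== PRECONDITION & SPEC =====
-- Pre_ excludes exactly the inputs where Python A raises IndexError: the empty grid
-- (grid[0]) and ragged grids with some row shorter than row 0 (grid[y][x], x < len(grid[0])).
def Pre_make_edges (grid : List (List String)) : Prop :=
  grid ≠ [] ∧ ∀ row ∈ grid, (grid.headD []).length ≤ row.length
instance (grid : List (List String)) : Decidable (Pre_make_edges grid) := by
  unfold Pre_make_edges; infer_instance
def pvWitness_make_edges : List (List String) := [["L", "W"], ["W", "L"]]

def Spec_make_edges (grid : List (List String)) (out : List (Int × Int × List (Int × Int))) : Prop := out = make_edges_alt grid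
instance (grid : List (List String)) (out : List (Int × Int × List (Int × Int))) : Decidable (Spec_make_edges grid out) := by unfold Spec_make_edges; infer_instance

-- ===== CLAIM (what is proved, stated in full; the proofs are below) =====
def Claim_equal_make_edges : Prop := ∀ (grid : List (List String)), Dom_make_edges grid → Pre_make_edges grid → Spec_make_edges grid (make_edges grid)

-- ===== LEMMAS AND PROOFS =====

-- one of the four independent scatter folds B's single loop maintains at once
def pvScatter (grid : List (List String)) (n m : Int) (k : Int → Int → Int × Int) :
    PySem.Dict (Int × Int) (Int × Int) :=
  (PySem.List.pyRange 0 n 1).foldl (fun d y =>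
    (PySem.List.pyRange 0 m 1).foldl (fun d x =>
      if pvCell grid y x == "L" then d.insert (k x y) (x, y) else d) d) PySem.Dict.empty

-- B's 4-tuple fold is the 4-tuple of independent scatter folds
theorem pv_split (grid : List (List String)) (n m : Int) :
    ((PySem.List.pyRange 0 n 1).foldl (fun ds y =>
      (PySem.List.pyRange 0 m 1).foldl (fun ds x =>
        if pvCell grid y x == "L" then
          (ds.1.insert (x, y + 1) (x, y),
           ds.2.1.insert (x, y - 1) (x, y),
           ds.2.2.1.insert (x + 1, y) (x, y),
           ds.2.2.2.insert (x - 1, y) (x, y))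
        else ds) ds)
      ((PySem.Dict.empty, PySem.Dict.empty, PySem.Dict.empty, PySem.Dict.empty) :
        PySem.Dict (Int × Int) (Int × Int) × PySem.Dict (Int × Int) (Int × Int) ×
        PySem.Dict (Int × Int) (Int × Int) × PySem.Dict (Int × Int) (Int × Int))) =
    (pvScatter grid n m (fun x y => (x, y + 1)),
     pvScatter grid n m (fun x y => (x, y - 1)),
     pvScatter grid n m (fun x y => (x + 1, y)),
     pvScatter grid n m (fun x y => (x - 1, y))) := by
  have houter :
      (fun (ds : PySem.Dict (Int × Int) (Int × Int) × PySem.Dict (Int × Int) (Int × Int) ×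
          PySem.Dict (Int × Int) (Int × Int) × PySem.Dict (Int × Int) (Int × Int)) (y : Int) =>
        (PySem.List.pyRange 0 m 1).foldl (fun ds x =>
          if pvCell grid y x == "L" then
            (ds.1.insert (x, y + 1) (x, y),
             ds.2.1.insert (x, y - 1) (x, y),
             ds.2.2.1.insert (x + 1, y) (x, y),
             ds.2.2.2.insert (x - 1, y) (x, y))
          else ds) ds)
      = (fun ds y =>
          ((PySem.List.pyRange 0 m 1).foldl (fun d x =>
              if pvCell grid y x == "L" then d.insert (x, y + 1) (x, y) else d) ds.1,
           (PySem.List.pyRange 0 m 1).foldl (fun d x =>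
              if pvCell grid y x == "L" then d.insert (x, y - 1) (x, y) else d) ds.2.1,
           (PySem.List.pyRange 0 m 1).foldl (fun d x =>
              if pvCell grid y x == "L" then d.insert (x + 1, y) (x, y) else d) ds.2.2.1,
           (PySem.List.pyRange 0 m 1).foldl (fun d x =>
              if pvCell grid y x == "L" then d.insert (x - 1, y) (x, y) else d) ds.2.2.2)) := by
    funext ds y
    obtain ⟨a, b, c, d⟩ := ds
    have hstep :
        (fun (ds : PySem.Dict (Int × Int) (Int × Int) × PySem.Dict (Int × Int) (Int × Int) ×
            PySem.Dict (Int × Int) (Int × Int) × PySem.Dict (Int × Int) (Int × Int)) (x : Int) =>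
          if pvCell grid y x == "L" then
            (ds.1.insert (x, y + 1) (x, y),
             ds.2.1.insert (x, y - 1) (x, y),
             ds.2.2.1.insert (x + 1, y) (x, y),
             ds.2.2.2.insert (x - 1, y) (x, y))
          else ds)
        = (fun ds x =>
            ((if pvCell grid y x == "L" then ds.1.insert (x, y + 1) (x, y) else ds.1),
             ((if pvCell grid y x == "L" then ds.2.1.insert (x, y - 1) (x, y) else ds.2.1),
              ((if pvCell grid y x == "L" then ds.2.2.1.insert (x + 1, y) (x, y) else ds.2.2.1),
               (if pvCell grid y x == "L" then ds.2.2.2.insert (x - 1, y) (x, y) else ds.2.2.2))))) := by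
      funext ds x; split_ifs <;> rfl
    rw [hstep]
    rw [PySem.List.foldl_prod_mk
      (f := fun (d : PySem.Dict (Int × Int) (Int × Int)) x => if pvCell grid y x == "L" then d.insert (x, y + 1) (x, y) else d)
      (g := fun (s : PySem.Dict (Int × Int) (Int × Int) × PySem.Dict (Int × Int) (Int × Int) ×
          PySem.Dict (Int × Int) (Int × Int)) x =>
        ((if pvCell grid y x == "L" then s.1.insert (x, y - 1) (x, y) else s.1),
         ((if pvCell grid y x == "L" then s.2.1.insert (x + 1, y) (x, y) else s.2.1),
          (if pvCell grid y x == "L" then s.2.2.insert (x - 1, y) (x, y) else s.2.2))))]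
    rw [PySem.List.foldl_prod_mk
      (f := fun (d : PySem.Dict (Int × Int) (Int × Int)) x => if pvCell grid y x == "L" then d.insert (x, y - 1) (x, y) else d)
      (g := fun (s : PySem.Dict (Int × Int) (Int × Int) × PySem.Dict (Int × Int) (Int × Int)) x =>
        ((if pvCell grid y x == "L" then s.1.insert (x + 1, y) (x, y) else s.1),
         (if pvCell grid y x == "L" then s.2.insert (x - 1, y) (x, y) else s.2)))]
    rw [PySem.List.foldl_prod_mk
      (f := fun (d : PySem.Dict (Int × Int) (Int × Int)) x => if pvCell grid y x == "L" then d.insert (x + 1, y) (x, y) else d)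
      (g := fun (d : PySem.Dict (Int × Int) (Int × Int)) x => if pvCell grid y x == "L" then d.insert (x - 1, y) (x, y) else d)]
  rw [houter]
  rw [PySem.List.foldl_prod_mk
    (f := fun (d : PySem.Dict (Int × Int) (Int × Int)) y => (PySem.List.pyRange 0 m 1).foldl (fun d x =>
        if pvCell grid y x == "L" then d.insert (x, y + 1) (x, y) else d) d)
    (g := fun (s : PySem.Dict (Int × Int) (Int × Int) × PySem.Dict (Int × Int) (Int × Int) ×
        PySem.Dict (Int × Int) (Int × Int)) y =>
      ((PySem.List.pyRange 0 m 1).foldl (fun d x =>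
          if pvCell grid y x == "L" then d.insert (x, y - 1) (x, y) else d) s.1,
       (PySem.List.pyRange 0 m 1).foldl (fun d x =>
          if pvCell grid y x == "L" then d.insert (x + 1, y) (x, y) else d) s.2.1,
       (PySem.List.pyRange 0 m 1).foldl (fun d x =>
          if pvCell grid y x == "L" then d.insert (x - 1, y) (x, y) else d) s.2.2))]
  rw [PySem.List.foldl_prod_mk
    (f := fun (d : PySem.Dict (Int × Int) (Int × Int)) y => (PySem.List.pyRange 0 m 1).foldl (fun d x =>
        if pvCell grid y x == "L" then d.insert (x, y - 1) (x, y) else d) d)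
    (g := fun (s : PySem.Dict (Int × Int) (Int × Int) × PySem.Dict (Int × Int) (Int × Int)) y =>
      ((PySem.List.pyRange 0 m 1).foldl (fun d x =>
          if pvCell grid y x == "L" then d.insert (x + 1, y) (x, y) else d) s.1,
       (PySem.List.pyRange 0 m 1).foldl (fun d x =>
          if pvCell grid y x == "L" then d.insert (x - 1, y) (x, y) else d) s.2))]
  rw [PySem.List.foldl_prod_mk
    (f := fun (d : PySem.Dict (Int × Int) (Int × Int)) y => (PySem.List.pyRange 0 m 1).foldl (fun d x =>
        if pvCell grid y x == "L" then d.insert (x + 1, y) (x, y) else d) d)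
    (g := fun (d : PySem.Dict (Int × Int) (Int × Int)) y => (PySem.List.pyRange 0 m 1).foldl (fun d x =>
        if pvCell grid y x == "L" then d.insert (x - 1, y) (x, y) else d) d)]
  rfl

-- one row of a scatter fold, seen through get?
theorem pv_get?_row (grid : List (List String)) (y : Int)
    (k : Int → Int → Int × Int) (r : Int × Int → Int × Int)
    (hk : ∀ x y' q, k x y' = q ↔ (x, y') = r q)
    (l : List Int) (d : PySem.Dict (Int × Int) (Int × Int)) (q : Int × Int) :
    (l.foldl (fun d x => if pvCell grid y x == "L" then d.insert (k x y) (x, y) else d) d).get? q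
      = if (r q).2 = y ∧ (r q).1 ∈ l ∧ (pvCell grid y (r q).1 == "L") = true
        then some (r q) else d.get? q := by
  induction l generalizing d with
  | nil => simp
  | cons a t ih =>
    rw [List.foldl_cons, ih]
    by_cases h1 : (r q).2 = y ∧ (r q).1 ∈ t ∧ (pvCell grid y (r q).1 == "L") = true
    · rw [if_pos h1, if_pos ⟨h1.1, List.mem_cons_of_mem a h1.2.1, h1.2.2⟩]
    · rw [if_neg h1]
      by_cases hL : (pvCell grid y a == "L") = true
      · rw [if_pos hL, PySem.Dict.get?_insert]
        by_cases hq : q = k a y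
        · have hra : (a, y) = r q := (hk a y q).mp hq.symm
          rw [if_pos hq]
          have h2 : (r q).2 = y ∧ (r q).1 ∈ a :: t ∧ (pvCell grid y (r q).1 == "L") = true := by
            refine ⟨by rw [← hra], ?_, ?_⟩ <;> rw [← hra] <;> simp [hL]
          rw [if_pos h2, ← hra]
        · rw [if_neg hq, if_neg]
          rintro ⟨hy2, hmem, hLq⟩
          rcases List.mem_cons.mp hmem with he | ht
          · exact hq (((hk a y q).mpr (by rw [← he, ← hy2])).symm)
          · exact h1 ⟨hy2, ht, hLq⟩
      · rw [if_neg hL, if_neg]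
        rintro ⟨hy2, hmem, hLq⟩
        rcases List.mem_cons.mp hmem with he | ht
        · rw [he] at hLq; exact hL hLq
        · exact h1 ⟨hy2, ht, hLq⟩

theorem pv_get?_scatter_aux (grid : List (List String)) (m : Int)
    (k : Int → Int → Int × Int) (r : Int × Int → Int × Int)
    (hk : ∀ x y' q, k x y' = q ↔ (x, y') = r q)
    (L : List Int) (d : PySem.Dict (Int × Int) (Int × Int)) (q : Int × Int) :
    (L.foldl (fun d y => (PySem.List.pyRange 0 m 1).foldl
        (fun d x => if pvCell grid y x == "L" then d.insert (k x y) (x, y) else d) d) d).get? q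
      = if (r q).2 ∈ L ∧ 0 ≤ (r q).1 ∧ (r q).1 < m ∧ (pvCell grid (r q).2 (r q).1 == "L") = true
        then some (r q) else d.get? q := by
  induction L generalizing d with
  | nil => simp
  | cons a t ih =>
    rw [List.foldl_cons, ih]
    by_cases h1 : (r q).2 ∈ t ∧ 0 ≤ (r q).1 ∧ (r q).1 < m ∧ (pvCell grid (r q).2 (r q).1 == "L") = true
    · rw [if_pos h1, if_pos ⟨List.mem_cons_of_mem a h1.1, h1.2⟩]
    · rw [if_neg h1, pv_get?_row grid a k r hk]
      by_cases h2 : (r q).2 = a ∧ (r q).1 ∈ PySem.List.pyRange 0 m 1 ∧ (pvCell grid a (r q).1 == "L") = true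
      · rw [if_pos h2]
        have hb := (PySem.List.mem_pyRange_one).mp h2.2.1
        rw [if_pos ⟨by rw [h2.1]; exact List.mem_cons_self, hb.1, hb.2, by rw [h2.1]; exact h2.2.2⟩]
      · rw [if_neg h2, if_neg]
        rintro ⟨hmem, hb1, hb2, hLq⟩
        rcases List.mem_cons.mp hmem with he | ht
        · exact h2 ⟨he, (PySem.List.mem_pyRange_one).mpr ⟨hb1, hb2⟩, by rw [← he]; exact hLq⟩
        · exact h1 ⟨ht, hb1, hb2, hLq⟩

-- the whole scatter fold, seen through get?
theorem pv_get?_scatter (grid : List (List String)) (n m : Int)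
    (k : Int → Int → Int × Int) (r : Int × Int → Int × Int)
    (hk : ∀ x y' q, k x y' = q ↔ (x, y') = r q) (q : Int × Int) :
    (pvScatter grid n m k).get? q
      = if 0 ≤ (r q).2 ∧ (r q).2 < n ∧ 0 ≤ (r q).1 ∧ (r q).1 < m ∧
          (pvCell grid (r q).2 (r q).1 == "L") = true
        then some (r q) else none := by
  rw [pvScatter, pv_get?_scatter_aux grid m k r hk]
  simp [PySem.List.mem_pyRange_one, and_assoc]

theorem pv_filterMap4 {α β : Type} (f : α → Option β) (a b c d : α) :
    List.filterMap f [a, b, c, d] =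
      (f a).toList ++ ((f b).toList ++ ((f c).toList ++ (f d).toList)) := by
  cases h1 : f a <;> cases h2 : f b <;> cases h3 : f c <;> cases h4 : f d <;>
    simp [h1, h2, h3, h4]

theorem pv_step {α : Type} (c1 c2 : Prop) [Decidable c1] [Decidable c2]
    (a : List α) (p : α) :
    (if c1 then (if c2 then a ++ [p] else a) else a) = a ++ (if c1 ∧ c2 then [p] else []) := by
  split_ifs <;> simp_all

-- ===== VERDICT =====
theorem make_edges_spec : Claim_equal_make_edges := by
  intro grid _ _
  unfold Spec_make_edges make_edges make_edges_alt
  dsimp only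
  rw [pv_split]
  apply PySem.List.foldl_congr_mem
  intro acc y hy
  apply PySem.List.foldl_congr_mem
  intro acc2 x hx
  rw [PySem.List.mem_pyRange_one] at hy hx
  by_cases hW : (pvCell grid y x == "W") = true
  · rw [if_pos hW, if_neg (by simp [bne, hW])]
  · have hW' : (pvCell grid y x == "W") = false := Bool.eq_false_iff.mpr hW
    have hg : (pvCell grid y x != "W") = true := by
      have hb : (pvCell grid y x != "W") = !(pvCell grid y x == "W") := rfl
      rw [hb, hW']; rfl
    rw [if_neg hW, if_pos hg]
    rw [pv_filterMap4]
    dsimp only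
    rw [pv_get?_scatter grid _ _ _ (fun q => (q.1, q.2 - 1))
          (by intro x' y' q; obtain ⟨q1, q2⟩ := q; simp [Prod.ext_iff]; omega) (x, y),
        pv_get?_scatter grid _ _ _ (fun q => (q.1, q.2 + 1))
          (by intro x' y' q; obtain ⟨q1, q2⟩ := q; simp [Prod.ext_iff]; omega) (x, y),
        pv_get?_scatter grid _ _ _ (fun q => (q.1 - 1, q.2))
          (by intro x' y' q; obtain ⟨q1, q2⟩ := q; simp [Prod.ext_iff]; omega) (x, y),
        pv_get?_scatter grid _ _ _ (fun q => (q.1 + 1, q.2))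
          (by intro x' y' q; obtain ⟨q1, q2⟩ := q; simp [Prod.ext_iff]; omega) (x, y)]
    dsimp only
    simp only [apply_ite (f := Option.toList), Option.toList_some, Option.toList_none]
    simp only [pv_step]
    simp only [List.nil_append, List.append_assoc]
    obtain ⟨hy0, hyn⟩ := hy
    obtain ⟨hx0, hxm⟩ := hx
    have e1 : (0 ≤ y - 1 ∧ y - 1 < (grid.length : Int) ∧ 0 ≤ x ∧
        x < (((PySem.List.pyGet? grid 0).getD []).length : Int) ∧
        (pvCell grid (y - 1) x == "L") = true) = (y > 0 ∧ (pvCell grid (y - 1) x == "L") = true) :=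
      propext ⟨fun h => ⟨by omega, h.2.2.2.2⟩, fun h => ⟨by omega, by omega, hx0, hxm, h.2⟩⟩
    have e2 : (0 ≤ y + 1 ∧ y + 1 < (grid.length : Int) ∧ 0 ≤ x ∧
        x < (((PySem.List.pyGet? grid 0).getD []).length : Int) ∧
        (pvCell grid (y + 1) x == "L") = true) =
        (y < (grid.length : Int) - 1 ∧ (pvCell grid (y + 1) x == "L") = true) :=
      propext ⟨fun h => ⟨by omega, h.2.2.2.2⟩, fun h => ⟨by omega, by omega, hx0, hxm, h.2⟩⟩
    have e3 : (0 ≤ y ∧ y < (grid.length : Int) ∧ 0 ≤ x - 1 ∧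
        x - 1 < (((PySem.List.pyGet? grid 0).getD []).length : Int) ∧
        (pvCell grid y (x - 1) == "L") = true) = (x > 0 ∧ (pvCell grid y (x - 1) == "L") = true) :=
      propext ⟨fun h => ⟨by omega, h.2.2.2.2⟩, fun h => ⟨hy0, hyn, by omega, by omega, h.2⟩⟩
    have e4 : (0 ≤ y ∧ y < (grid.length : Int) ∧ 0 ≤ x + 1 ∧
        x + 1 < (((PySem.List.pyGet? grid 0).getD []).length : Int) ∧
        (pvCell grid y (x + 1) == "L") = true) =
        (x < (((PySem.List.pyGet? grid 0).getD []).length : Int) - 1 ∧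
          (pvCell grid y (x + 1) == "L") = true) :=
      propext ⟨fun h => ⟨by omega, h.2.2.2.2⟩, fun h => ⟨hy0, hyn, by omega, by omega, h.2⟩⟩
    simp only [e1, e2, e3, e4]
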